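-- pv_equiv track=rewrite | github.com/codersoumya23/DataEncryption | FradulentTransaction.py | is_eligible_transaction
-- ===== SOURCE A (Python) =====
-- def is_eligible_transaction(n, transfers):
--     # Create a dictionary to store the net asset change for each client
--     net_assets = {i: 0 for i in range(n)}
--
--     # Calculate net asset change for each client based on transfers
--     for transfer in transfers:
--         sender, receiver = transfer
--         net_assets[sender] -= 1
--         net_assets[receiver] += 1
--
--     # Check if any client indirectly receives assets from themselves
--     visited = set()
--
--     def dfs(client):
--         visited.add(client)
--         for i in range(n):
--             if net_assets[i] < 0 and i not in visited:
--                 if dfs(i):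
--                     return True
--             elif i == client and net_assets[i] > 0:
--                 return True
--         return False
--
--     for client in range(n):
--         if client not in visited and dfs(client):
--             return "Ineligible"
--
--     return "Eligible"
-- ===== SOURCE B (Python) =====
-- def is_eligible_transaction(n, transfers):
--     # One pass: tally net balance per client, then check for any positive balance.
--     net = [0] * n
--     for sender, receiver in transfers:
--         net[sender] -= 1
--         net[receiver] += 1
--     return "Ineligible" if any(v > 0 for v in net) else "Eligible"
-- ===== Notes on version B (the rewrite author's own statement) =====
-- stated objective: faster
-- what changed: Replaced A's dict-of-range initialisation plus a visited-set DFS with nested range(n) scans by a single array tally over the transfers followed by one linear any(v > 0) scan; the DFS machinery is removed entirely since A's answer is exactly 'some client has positive net balance'.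
import Mathlib
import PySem

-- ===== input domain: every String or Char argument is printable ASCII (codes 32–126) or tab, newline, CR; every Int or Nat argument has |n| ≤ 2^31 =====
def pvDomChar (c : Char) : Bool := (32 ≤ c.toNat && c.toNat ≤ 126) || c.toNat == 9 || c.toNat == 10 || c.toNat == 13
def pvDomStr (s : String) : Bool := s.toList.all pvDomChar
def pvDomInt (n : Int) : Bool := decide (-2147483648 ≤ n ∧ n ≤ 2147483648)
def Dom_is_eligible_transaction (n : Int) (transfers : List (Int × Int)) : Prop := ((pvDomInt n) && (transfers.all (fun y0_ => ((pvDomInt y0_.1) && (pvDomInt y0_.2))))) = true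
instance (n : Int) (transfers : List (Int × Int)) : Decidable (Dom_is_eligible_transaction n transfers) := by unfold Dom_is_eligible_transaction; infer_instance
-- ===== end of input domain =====

-- B replaces A's visited-set DFS over nested range(n) scans by a single tally pass and one
-- linear positive-balance scan (objective: faster, asymptotic O(n+m) vs O(n^2+m)).

-- ===== PORT A =====
-- net_assets[k] = net_assets[k] + δ : Python raises KeyError when k is absent (excluded by Pre_;
-- the none branch leaves the dict unchanged there).
def pvAdjust (d : PySem.Dict Int Int) (k : Int) (δ : Int) : PySem.Dict Int Int :=
  match d.get? k with
  | some v => d.insert k (v + δ)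
  | none => d

-- dfs(client) with the visited set threaded through; fuel only guards termination (the Python
-- recursion depth is at most the number of clients, so fuel = n.toNat + 1 is never exhausted).
-- net_assets[i] inside dfs is read with getD 0: i ranges over range(n), where the key is present.
mutual
def pvDfs (net : PySem.Dict Int Int) (n : Int) : Nat → Int → PySem.Set Int → Bool × PySem.Set Int
  | 0, _, vis => (false, vis)
  | fuel+1, client, vis =>
      pvDfsLoop net n fuel client (PySem.List.pyRange 0 n 1) (PySem.Set.add vis client)
termination_by f _ _ => (f, 0)

def pvDfsLoop (net : PySem.Dict Int Int) (n : Int) (fuel : Nat) (client : Int) :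
    List Int → PySem.Set Int → Bool × PySem.Set Int
  | [], vis => (false, vis)
  | i :: rest, vis =>
      if net.getD i 0 < 0 && !(PySem.Set.contains vis i) then
        let p := pvDfs net n fuel i vis
        if p.1 then (true, p.2) else pvDfsLoop net n fuel client rest p.2
      else if i == client && net.getD i 0 > 0 then (true, vis)
      else pvDfsLoop net n fuel client rest vis
termination_by is _ => (fuel, is.length + 1)
end

-- for client in range(n): if client not in visited and dfs(client): return "Ineligible"
def pvOuter (net : PySem.Dict Int Int) (n : Int) (fuel : Nat) :
    List Int → PySem.Set Int → String
  | [], _ => "Eligible"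
  | c :: rest, vis =>
      if !(PySem.Set.contains vis c) then
        let p := pvDfs net n fuel c vis
        if p.1 then "Ineligible" else pvOuter net n fuel rest p.2
      else pvOuter net n fuel rest vis

def is_eligible_transaction (n : Int) (transfers : List (Int × Int)) : String :=
  let net0 := (PySem.List.pyRange 0 n 1).foldl (fun d i => d.insert i 0) PySem.Dict.empty
  let net := transfers.foldl (fun d t => pvAdjust (pvAdjust d t.1 (-1)) t.2 1) net0
  pvOuter net n (n.toNat + 1) (PySem.List.pyRange 0 n 1) PySem.Set.empty

-- ===== PORT B =====
-- net[s] -= 1 / net[r] += 1 : pyGetD/pySetD are exact under Pre_'s in-range indices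
-- (Python raises IndexError outside; excluded by Pre_).
def is_eligible_transaction_alt (n : Int) (transfers : List (Int × Int)) : String :=
  let net := transfers.foldl (fun l t =>
    let l1 := PySem.List.pySetD l t.1 (PySem.List.pyGetD l t.1 0 - 1)
    PySem.List.pySetD l1 t.2 (PySem.List.pyGetD l1 t.2 0 + 1)) (List.replicate n.toNat (0 : Int))
  if net.any (fun v => v > 0) then "Ineligible" else "Eligible"

-- ===== PRECONDITION & SPEC =====
-- Pre_ excludes exactly the transfers naming a client outside range(n), where Python A raises KeyError.
def Pre_is_eligible_transaction (n : Int) (transfers : List (Int × Int)) : Prop :=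
  ∀ t ∈ transfers, 0 ≤ t.1 ∧ t.1 < n ∧ 0 ≤ t.2 ∧ t.2 < n
instance (n : Int) (transfers : List (Int × Int)) : Decidable (Pre_is_eligible_transaction n transfers) := by
  unfold Pre_is_eligible_transaction; infer_instance

def pvWitness_is_eligible_transaction : Int × (List (Int × Int)) := (3, [(0, 1), (2, 1)])

def Spec_is_eligible_transaction (n : Int) (transfers : List (Int × Int)) (out : String) : Prop := out = is_eligible_transaction_alt n transfers
instance (n : Int) (transfers : List (Int × Int)) (out : String) : Decidable (Spec_is_eligible_transaction n transfers out) := by unfold Spec_is_eligible_transaction; infer_instance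

-- ===== CLAIM (what is proved, stated in full; the proofs are below) =====
def Claim_equal_is_eligible_transaction : Prop := ∀ (n : Int) (transfers : List (Int × Int)), Dom_is_eligible_transaction n transfers → Pre_is_eligible_transaction n transfers → Spec_is_eligible_transaction n transfers (is_eligible_transaction n transfers)

-- ===== LEMMAS AND PROOFS =====

-- dfs returns false whenever its client's net balance is nonpositive (any fuel, any visited set).
theorem pvDfsLoop_false (net : PySem.Dict Int Int) (n : Int) (fuel : Nat) (client : Int)
    (HIH : ∀ c vis, net.getD c 0 ≤ 0 → (pvDfs net n fuel c vis).1 = false)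
    (hc : net.getD client 0 ≤ 0) :
    ∀ (is : List Int) (vis : PySem.Set Int), (pvDfsLoop net n fuel client is vis).1 = false := by
  intro is
  induction is with
  | nil => intro vis; simp [pvDfsLoop]
  | cons i rest ih =>
    intro vis
    simp only [pvDfsLoop]
    by_cases h1 : (decide (net.getD i 0 < 0) && !(PySem.Set.contains vis i)) = true
    · rw [if_pos h1]
      have hneg : net.getD i 0 ≤ 0 := by
        have := ((Bool.and_eq_true _ _).mp h1).1
        rw [decide_eq_true_eq] at this; omega
      rw [HIH i vis hneg, if_neg Bool.false_ne_true]
      exact ih _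
    · rw [if_neg h1]
      have h2 : (i == client && decide (net.getD i 0 > 0)) = false := by
        by_cases he : i = client
        · subst he
          have : decide (net.getD i 0 > 0) = false := decide_eq_false (by omega)
          simp [this]
        · simp [he]
      rw [h2, if_neg Bool.false_ne_true]
      exact ih _

theorem pvDfs_false (net : PySem.Dict Int Int) (n : Int) :
    ∀ (fuel : Nat) (c : Int) (vis : PySem.Set Int),
      net.getD c 0 ≤ 0 → (pvDfs net n fuel c vis).1 = false := by
  intro fuel
  induction fuel with
  | zero => intro c vis _; simp [pvDfs]
  | succ f ih =>
    intro c vis hc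
    simp only [pvDfs]
    exact pvDfsLoop_false net n f c ih hc _ _

theorem pvDfsLoop_true (net : PySem.Dict Int Int) (n : Int) (fuel : Nat) (client : Int)
    (hc : net.getD client 0 > 0) :
    ∀ (is : List Int), client ∈ is →
      ∀ (vis : PySem.Set Int), (pvDfsLoop net n fuel client is vis).1 = true := by
  intro is
  induction is with
  | nil => intro h; cases h
  | cons i rest ih =>
    intro hmem vis
    simp only [pvDfsLoop]
    by_cases hi : i = client
    · subst hi
      have h1 : (decide (net.getD i 0 < 0) && !(PySem.Set.contains vis i)) = false := by
        have : decide (net.getD i 0 < 0) = false := decide_eq_false (by omega)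
        simp [this]
      rw [h1, if_neg Bool.false_ne_true]
      have h2 : (i == i && decide (net.getD i 0 > 0)) = true := by
        simp [decide_eq_true hc]
      rw [if_pos h2]
    · have hrest : client ∈ rest := by
        cases hmem with
        | head => exact absurd rfl hi
        | tail _ h => exact h
      by_cases h1 : (decide (net.getD i 0 < 0) && !(PySem.Set.contains vis i)) = true
      · rw [if_pos h1]
        have hneg : net.getD i 0 ≤ 0 := by
          have := ((Bool.and_eq_true _ _).mp h1).1
          rw [decide_eq_true_eq] at this; omega
        rw [pvDfs_false net n fuel i vis hneg, if_neg Bool.false_ne_true]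
        exact ih hrest _
      · rw [if_neg h1]
        have h2 : (i == client && decide (net.getD i 0 > 0)) = false := by
          have : (i == client) = false := by simp [hi]
          simp [this]
        rw [h2, if_neg Bool.false_ne_true]
        exact ih hrest _

theorem pvDfs_true (net : PySem.Dict Int Int) (n : Int) (fuel : Nat) (c : Int)
    (vis : PySem.Set Int) (hc0 : 0 ≤ c) (hcn : c < n) (hpos : net.getD c 0 > 0) :
    (pvDfs net n (fuel + 1) c vis).1 = true := by
  simp only [pvDfs]
  exact pvDfsLoop_true net n fuel c hpos _ ((PySem.List.mem_pyRange_one).mpr ⟨hc0, hcn⟩) _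

-- every client added to visited by dfs is the called client or has negative net balance
theorem pvDfsLoop_vis (net : PySem.Dict Int Int) (n : Int) (fuel : Nat) (client : Int)
    (HIH : ∀ c vis x, x ∈ (pvDfs net n fuel c vis).2 → x ∈ vis ∨ x = c ∨ net.getD x 0 < 0) :
    ∀ (is : List Int) (vis : PySem.Set Int) (x : Int),
      x ∈ (pvDfsLoop net n fuel client is vis).2 → x ∈ vis ∨ net.getD x 0 < 0 := by
  intro is
  induction is with
  | nil => intro vis x hx; simp only [pvDfsLoop] at hx; exact Or.inl hx
  | cons i rest ih =>
    intro vis x hx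
    simp only [pvDfsLoop] at hx
    by_cases h1 : (decide (net.getD i 0 < 0) && !(PySem.Set.contains vis i)) = true
    · rw [if_pos h1] at hx
      have hneg : net.getD i 0 < 0 := by
        have := ((Bool.and_eq_true _ _).mp h1).1
        rwa [decide_eq_true_eq] at this
      by_cases hp : (pvDfs net n fuel i vis).1 = true
      · rw [if_pos hp] at hx
        rcases HIH i vis x hx with h | h | h
        · exact Or.inl h
        · exact Or.inr (h ▸ hneg)
        · exact Or.inr h
      · rw [if_neg hp] at hx
        rcases ih _ x hx with h | h
        · rcases HIH i vis x h with h' | h' | h'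
          · exact Or.inl h'
          · exact Or.inr (h' ▸ hneg)
          · exact Or.inr h'
        · exact Or.inr h
    · rw [if_neg h1] at hx
      by_cases h2 : (i == client && decide (net.getD i 0 > 0)) = true
      · rw [if_pos h2] at hx; exact Or.inl hx
      · rw [if_neg h2] at hx; exact ih _ x hx

theorem pvDfs_vis (net : PySem.Dict Int Int) (n : Int) :
    ∀ (fuel : Nat) (c : Int) (vis : PySem.Set Int) (x : Int),
      x ∈ (pvDfs net n fuel c vis).2 → x ∈ vis ∨ x = c ∨ net.getD x 0 < 0 := by
  intro fuel
  induction fuel with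
  | zero => intro c vis x hx; simp only [pvDfs] at hx; exact Or.inl hx
  | succ f ih =>
    intro c vis x hx
    simp only [pvDfs] at hx
    rcases pvDfsLoop_vis net n f c ih _ _ x hx with h | h
    · rcases (PySem.Set.mem_add vis c x).mp h with h' | h'
      · exact Or.inl h'
      · exact Or.inr (Or.inl h')
    · exact Or.inr (Or.inr h)

-- the outer loop returns "Ineligible" exactly when some client in the list has positive balance
theorem pvOuter_eq (net : PySem.Dict Int Int) (n : Int) (fuel : Nat) :
    ∀ (cs : List Int) (vis : PySem.Set Int),
      (∀ c ∈ cs, 0 ≤ c ∧ c < n) →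
      (∀ x ∈ vis, net.getD x 0 ≤ 0) →
      pvOuter net n (fuel + 1) cs vis =
        if cs.any (fun c => net.getD c 0 > 0) then "Ineligible" else "Eligible" := by
  intro cs
  induction cs with
  | nil => intro vis _ _; simp [pvOuter]
  | cons c rest ih =>
    intro vis hcs hvis
    simp only [pvOuter]
    by_cases hv : PySem.Set.contains vis c = true
    · have hm : c ∈ vis := by simpa using hv
      have hnv : (!(PySem.Set.contains vis c)) = false := by simpa using hm
      rw [hnv, if_neg Bool.false_ne_true]
      have hc : net.getD c 0 ≤ 0 := hvis c hm
      rw [ih vis (fun x hx => hcs x (List.mem_cons_of_mem _ hx)) hvis]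
      have hd : decide (net.getD c 0 > 0) = false := decide_eq_false (by omega)
      simp only [List.any_cons, hd, Bool.false_or]
    · have hm : c ∉ vis := fun hmem => hv (by simpa using hmem)
      have hnv : (!(PySem.Set.contains vis c)) = true := by simpa using hm
      rw [hnv, if_pos rfl]
      have hcn := hcs c (List.mem_cons_self ..)
      by_cases hpos : net.getD c 0 > 0
      · rw [pvDfs_true net n fuel c vis hcn.1 hcn.2 hpos, if_pos rfl]
        have hd : decide (net.getD c 0 > 0) = true := decide_eq_true hpos
        simp [List.any_cons, hd]
      · have hfalse : (pvDfs net n (fuel + 1) c vis).1 = false :=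
          pvDfs_false net n (fuel + 1) c vis (by omega)
        rw [hfalse, if_neg Bool.false_ne_true]
        have hvis' : ∀ x ∈ (pvDfs net n (fuel + 1) c vis).2, net.getD x 0 ≤ 0 := by
          intro x hx
          rcases pvDfs_vis net n (fuel + 1) c vis x hx with h | h | h
          · exact hvis x h
          · subst h; omega
          · omega
        rw [ih _ (fun x hx => hcs x (List.mem_cons_of_mem _ hx)) hvis']
        have hd : decide (net.getD c 0 > 0) = false := decide_eq_false (by omega)
        simp only [List.any_cons, hd, Bool.false_or]

-- the initial dict {i: 0 for i in range(n)}
theorem pvInit_get? (L : List Int) :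
    ∀ (d : PySem.Dict Int Int) (k : Int),
      (L.foldl (fun d i => d.insert i 0) d).get? k =
        if k ∈ L then some 0 else d.get? k := by
  induction L with
  | nil => intro d k; simp
  | cons i L' ih =>
    intro d k
    simp only [List.foldl_cons, ih, List.mem_cons]
    rw [PySem.Dict.get?_insert]
    by_cases h1 : k ∈ L'
    · simp [h1]
    · by_cases h2 : k = i <;> simp [h1, h2]

-- list update through an in-range Python index
theorem pvStep_list (n : Int) (l : List Int) (hl : l.length = n.toNat) (s k : Int)
    (hs0 : 0 ≤ s) (hsn : s < n) (hk0 : 0 ≤ k) (hkn : k < n) (v : Int) :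
    PySem.List.pyGetD (PySem.List.pySetD l s v) k 0 = if k = s then v else PySem.List.pyGetD l k 0 := by
  have hsl : s < (l.length : Int) := by omega
  have hkl : k < (l.length : Int) := by omega
  rw [show PySem.List.pySetD l s v = l.set s.toNat v from PySem.List.pySetD_of_nonneg l v hs0]
  rw [PySem.List.pyGetD_eq_getElem (l.set s.toNat v) 0 hk0 (by simpa using hkl)]
  rw [List.getElem_set]
  by_cases he : k = s
  · have : k.toNat = s.toNat := by omega
    simp [he]
  · have hne : s.toNat ≠ k.toNat := by omega
    rw [if_neg hne, if_neg he, PySem.List.pyGetD_eq_getElem l 0 hk0 hkl]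

theorem pvStep_len (l : List Int) (s v : Int) :
    (PySem.List.pySetD l s v).length = l.length := PySem.List.length_pySetD ..

theorem pvAdjust_get? (d : PySem.Dict Int Int) (s : Int) (w δ : Int)
    (h : d.get? s = some w) (k : Int) :
    (pvAdjust d s δ).get? k = if k = s then some (w + δ) else d.get? k := by
  unfold pvAdjust
  rw [h]
  exact PySem.Dict.get?_insert ..

-- the bridge invariant between A's dict and B's array, maintained through the transfer fold
theorem pvFold_invariant (n : Int) :
    ∀ (transfers : List (Int × Int)) (d : PySem.Dict Int Int) (l : List Int),
      (∀ t ∈ transfers, 0 ≤ t.1 ∧ t.1 < n ∧ 0 ≤ t.2 ∧ t.2 < n) →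
      l.length = n.toNat →
      (∀ k : Int, d.get? k = if 0 ≤ k ∧ k < n then some (PySem.List.pyGetD l k 0) else none) →
      (transfers.foldl (fun l t =>
          let l1 := PySem.List.pySetD l t.1 (PySem.List.pyGetD l t.1 0 - 1)
          PySem.List.pySetD l1 t.2 (PySem.List.pyGetD l1 t.2 0 + 1)) l).length = n.toNat ∧
      ∀ k : Int, (transfers.foldl (fun d t => pvAdjust (pvAdjust d t.1 (-1)) t.2 1) d).get? k =
        if 0 ≤ k ∧ k < n then
          some (PySem.List.pyGetD
            (transfers.foldl (fun l t =>
              let l1 := PySem.List.pySetD l t.1 (PySem.List.pyGetD l t.1 0 - 1)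
              PySem.List.pySetD l1 t.2 (PySem.List.pyGetD l1 t.2 0 + 1)) l) k 0)
        else none := by
  intro transfers
  induction transfers with
  | nil => intro d l _ hl hd; exact ⟨hl, hd⟩
  | cons t rest ih =>
    intro d l hpre hl hd
    obtain ⟨hs0, hsn, hr0, hrn⟩ := hpre t (List.mem_cons_self ..)
    simp only [List.foldl_cons]
    set l1 := PySem.List.pySetD l t.1 (PySem.List.pyGetD l t.1 0 - 1) with hl1
    set l2 := PySem.List.pySetD l1 t.2 (PySem.List.pyGetD l1 t.2 0 + 1) with hl2
    have hl1len : l1.length = n.toNat := by rw [hl1, pvStep_len, hl]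
    have hl2len : l2.length = n.toNat := by rw [hl2, pvStep_len, hl1len]
    -- dict step 1
    have hgs : d.get? t.1 = some (PySem.List.pyGetD l t.1 0) := by
      rw [hd t.1, if_pos ⟨hs0, hsn⟩]
    have hd1 : ∀ k : Int, (pvAdjust d t.1 (-1)).get? k =
        if 0 ≤ k ∧ k < n then some (PySem.List.pyGetD l1 k 0) else none := by
      intro k
      rw [pvAdjust_get? d t.1 _ (-1) hgs k]
      by_cases hk : 0 ≤ k ∧ k < n
      · rw [if_pos hk, hl1, pvStep_list n l hl t.1 k hs0 hsn hk.1 hk.2]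
        by_cases he : k = t.1
        · rw [if_pos he, if_pos he]; congr 1
        · rw [if_neg he, if_neg he, hd k, if_pos hk]
      · rw [if_neg hk]
        by_cases he : k = t.1
        · exact absurd (he ▸ ⟨hs0, hsn⟩) hk
        · rw [if_neg he, hd k, if_neg hk]
    have hgr : (pvAdjust d t.1 (-1)).get? t.2 = some (PySem.List.pyGetD l1 t.2 0) := by
      rw [hd1 t.2, if_pos ⟨hr0, hrn⟩]
    have hd2 : ∀ k : Int, (pvAdjust (pvAdjust d t.1 (-1)) t.2 1).get? k =
        if 0 ≤ k ∧ k < n then some (PySem.List.pyGetD l2 k 0) else none := by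
      intro k
      rw [pvAdjust_get? _ t.2 _ 1 hgr k]
      by_cases hk : 0 ≤ k ∧ k < n
      · rw [if_pos hk, hl2, pvStep_list n l1 hl1len t.2 k hr0 hrn hk.1 hk.2]
        by_cases he : k = t.2
        · rw [if_pos he, if_pos he]
        · rw [if_neg he, if_neg he, hd1 k, if_pos hk]
      · rw [if_neg hk]
        by_cases he : k = t.2
        · exact absurd (he ▸ ⟨hr0, hrn⟩) hk
        · rw [if_neg he, hd1 k, if_neg hk]
    exact ih _ l2 (fun u hu => hpre u (List.mem_cons_of_mem _ hu)) hl2len hd2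

-- ===== VERDICT (by name: the statement is the Claim_ definition above) =====
theorem is_eligible_transaction_spec : Claim_equal_is_eligible_transaction := by
  intro n transfers _ hpre
  simp only [Spec_is_eligible_transaction, is_eligible_transaction, is_eligible_transaction_alt]
  have hinit : ∀ k : Int,
      ((PySem.List.pyRange 0 n 1).foldl (fun d i => d.insert i 0) PySem.Dict.empty).get? k =
        if 0 ≤ k ∧ k < n then some (PySem.List.pyGetD (List.replicate n.toNat (0 : Int)) k 0) else none := by
    intro k
    rw [pvInit_get? (PySem.List.pyRange 0 n 1) PySem.Dict.empty k]
    by_cases hk : 0 ≤ k ∧ k < n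
    · rw [if_pos (PySem.List.mem_pyRange_one.mpr hk), if_pos hk]
      rw [PySem.List.pyGetD_eq_getElem (List.replicate n.toNat (0 : Int)) 0 hk.1
        (by simp; omega)]
      simp
    · rw [if_neg (fun hm => hk (PySem.List.mem_pyRange_one.mp hm)), if_neg hk,
        PySem.Dict.get?_empty]
  obtain ⟨hlen, hinv⟩ := pvFold_invariant n transfers
    ((PySem.List.pyRange 0 n 1).foldl (fun d i => d.insert i 0) PySem.Dict.empty)
    (List.replicate n.toNat (0 : Int)) hpre (by simp) hinit
  rw [pvOuter_eq _ n n.toNat (PySem.List.pyRange 0 n 1) PySem.Set.empty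
    (fun c hc => PySem.List.mem_pyRange_one.mp hc)
    (fun x hx => absurd hx (by simp [PySem.Set.empty]))]
  have hcond :
      ((PySem.List.pyRange 0 n 1).any fun c =>
        decide ((transfers.foldl (fun d t => pvAdjust (pvAdjust d t.1 (-1)) t.2 1)
          ((PySem.List.pyRange 0 n 1).foldl (fun d i => d.insert i 0) PySem.Dict.empty)).getD c 0 > 0)) =
      ((transfers.foldl (fun l t =>
          let l1 := PySem.List.pySetD l t.1 (PySem.List.pyGetD l t.1 0 - 1)
          PySem.List.pySetD l1 t.2 (PySem.List.pyGetD l1 t.2 0 + 1))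
          (List.replicate n.toNat (0 : Int))).any fun v => decide (v > 0)) := by
    set netB := transfers.foldl (fun l t =>
          let l1 := PySem.List.pySetD l t.1 (PySem.List.pyGetD l t.1 0 - 1)
          PySem.List.pySetD l1 t.2 (PySem.List.pyGetD l1 t.2 0 + 1))
          (List.replicate n.toNat (0 : Int)) with hnetB
    rw [Bool.eq_iff_iff]
    simp only [List.any_eq_true, decide_eq_true_eq]
    constructor
    · rintro ⟨c, hc, hpos⟩
      obtain ⟨hc0, hcn⟩ := PySem.List.mem_pyRange_one.mp hc
      have h := hinv c
      rw [if_pos ⟨hc0, hcn⟩] at h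
      rw [PySem.Dict.getD_eq_get?_getD, h, Option.getD_some] at hpos
      refine ⟨PySem.List.pyGetD netB c 0, ?_, hpos⟩
      rw [PySem.List.pyGetD_eq_getElem netB 0 hc0 (by rw [hlen]; omega)]
      exact List.getElem_mem _
    · rintro ⟨v, hv, hpos⟩
      obtain ⟨i, hi, rfl⟩ := List.mem_iff_getElem.mp hv
      have hin : netB.length = n.toNat := hlen
      have hi' : (i : Int) < n := by omega
      refine ⟨(i : Int), PySem.List.mem_pyRange_one.mpr ⟨by omega, hi'⟩, ?_⟩
      have h := hinv (i : Int)
      rw [if_pos ⟨by omega, hi'⟩] at h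
      rw [PySem.Dict.getD_eq_get?_getD, h, Option.getD_some,
        PySem.List.pyGetD_eq_getElem netB 0 (by omega) (by omega)]
      simpa using hpos
  rw [hcond]
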